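-- pv_equiv track=rewrite | github.com/rishabh-in/RandomProblems | happyVal.py | happyVal
-- ===== SOURCE A (Python) =====
-- def happyVal(n, k, arr):
--     happy = 0
--     for val in range(0, len(arr)):
--         currentMin = arr[val] - k
--         currentMax = arr[val] + k
--         flag = False
--         for i in range(val+1, len(arr)):
--             if arr[i] <= currentMax and arr[i] >= currentMin:
--                 happy += 1
--                 flag = True
--                 break
--
--         if flag is True:
--             continue
--
--         for j in range(0, val):
--             if arr[j] <= currentMax and arr[j] >= currentMin:
--                 happy += 1
--                 break
--
--     return happy
-- ===== SOURCE B (Python) =====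
-- def happyVal(n, k, arr):
--     s = sorted(arr)
--     happy = 0
--     for i in range(len(s)):
--         if (i > 0 and s[i] - s[i-1] <= k) or (i + 1 < len(s) and s[i+1] - s[i] <= k):
--             happy += 1
--     return happy
-- ===== Notes on version B (the rewrite author's own statement) =====
-- stated objective: alternative
-- what changed: Replaced A's per-element forward/backward scans for a value within distance k by sorting once and checking only the two adjacent neighbours in sorted order (the nearest value in a sorted array is adjacent); O(n log n) worst case vs A's O(n^2) worst case, though A's early break keeps it competitive on random inputs, so no speed is claimed.
import Mathlib
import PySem

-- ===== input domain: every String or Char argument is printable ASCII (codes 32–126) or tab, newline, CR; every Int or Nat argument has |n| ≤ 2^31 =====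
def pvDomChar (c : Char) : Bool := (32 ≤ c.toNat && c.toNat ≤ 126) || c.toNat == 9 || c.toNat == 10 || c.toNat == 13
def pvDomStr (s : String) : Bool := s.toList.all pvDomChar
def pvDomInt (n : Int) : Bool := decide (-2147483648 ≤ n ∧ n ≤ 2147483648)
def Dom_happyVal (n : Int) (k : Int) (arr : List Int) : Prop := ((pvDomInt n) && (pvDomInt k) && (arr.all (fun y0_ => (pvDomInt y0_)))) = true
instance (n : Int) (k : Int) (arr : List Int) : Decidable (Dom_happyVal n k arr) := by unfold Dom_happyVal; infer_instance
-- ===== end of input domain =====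

-- B sorts the array once and checks only the two adjacent neighbours in sorted order
-- (the nearest value is adjacent there), replacing A's per-element scans: an alternative algorithm.


-- ===== PORT A =====
def happyVal (n : Int) (k : Int) (arr : List Int) : Int :=
  (PySem.List.pyRange 0 (arr.length : Int) 1).foldl (fun happy val =>
    let cur := PySem.List.pyGetD arr val 0
    let currentMin := cur - k
    let currentMax := cur + k
    -- first inner loop: break on first hit, happy += 1 once
    if (PySem.List.pyRange (val + 1) (arr.length : Int) 1).any (fun i =>
         PySem.List.pyGetD arr i 0 ≤ currentMax && currentMin ≤ PySem.List.pyGetD arr i 0) then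
      happy + 1
    -- flag not set: second inner loop, break on first hit, happy += 1 once
    else if (PySem.List.pyRange 0 val 1).any (fun j =>
         PySem.List.pyGetD arr j 0 ≤ currentMax && currentMin ≤ PySem.List.pyGetD arr j 0) then
      happy + 1
    else
      happy) 0

-- ===== PORT B =====
def happyVal_alt (n : Int) (k : Int) (arr : List Int) : Int :=
  let s := PySem.List.sorted arr (fun x => x) false
  (PySem.List.pyRange 0 (s.length : Int) 1).foldl (fun happy i =>
    if (decide (0 < i) && decide (PySem.List.pyGetD s i 0 - PySem.List.pyGetD s (i - 1) 0 ≤ k))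
       || (decide (i + 1 < (s.length : Int)) && decide (PySem.List.pyGetD s (i + 1) 0 - PySem.List.pyGetD s i 0 ≤ k)) then
      happy + 1
    else
      happy) 0

-- ===== PRECONDITION & SPEC =====
def Spec_happyVal (n : Int) (k : Int) (arr : List Int) (out : Int) : Prop := out = happyVal_alt n k arr
instance (n : Int) (k : Int) (arr : List Int) (out : Int) : Decidable (Spec_happyVal n k arr out) := by unfold Spec_happyVal; infer_instance

-- ===== CLAIM (what is proved, stated in full; the proofs are below) =====
def Claim_equal_happyVal : Prop := ∀ (n : Int) (k : Int) (arr : List Int), Dom_happyVal n k arr → Spec_happyVal n k arr (happyVal n k arr)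

-- ===== LEMMAS AND PROOFS =====

-- y is within distance k of x
def inI (k x y : Int) : Bool := y ≤ x + k && x - k ≤ y

-- "x is happy w.r.t. the multiset l": some OTHER occurrence lies within distance k.
-- When 0 ≤ k, x itself lies in its own interval, so 2 hits in l are needed; otherwise 1.
def happyP (k : Int) (l : List Int) (x : Int) : Bool :=
  (if 0 ≤ k then 2 else 1) ≤ l.countP (inI k x)

-- having ANOTHER index within distance k depends only on the value and the multiset
lemma exists_other_iff (k x : Int) (l : List Int) (i : Nat) (hi : i < l.length) (hx : l[i] = x) :
    (∃ j, ∃ hj : j < l.length, j ≠ i ∧ inI k x (l[j]'hj) = true) ↔ happyP k l x = true := by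
  have hxx : inI k x x = decide (0 ≤ k) := by
    by_cases h : 0 ≤ k <;> simp [inI, h]
  have hperm := List.getElem_cons_eraseIdx_perm hi
  have hc : l.countP (inI k x) = (l.eraseIdx i).countP (inI k x) + (if 0 ≤ k then 1 else 0) := by
    rw [← hperm.countP_eq, List.countP_cons, hx, hxx]
    by_cases h : 0 ≤ k <;> simp [h]
  have hmm : (∃ j, ∃ hj : j < l.length, j ≠ i ∧ inI k x (l[j]'hj) = true) ↔
      0 < (l.eraseIdx i).countP (inI k x) := by
    rw [List.countP_pos_iff]
    constructor
    · rintro ⟨j, hj, hne, hp⟩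
      exact ⟨l[j], List.mem_eraseIdx_iff_getElem.mpr ⟨j, hj, hne, rfl⟩, hp⟩
    · rintro ⟨y, hy, hp⟩
      obtain ⟨j, hj, hne, rfl⟩ := List.mem_eraseIdx_iff_getElem.mp hy
      exact ⟨j, hj, hne, hp⟩
  rw [hmm]
  simp only [happyP, hc, decide_eq_true_iff]
  by_cases h : 0 ≤ k <;> simp [h]

-- A's per-element condition: some other index (forward scan, then backward scan) is in range
def pAcond (k : Int) (arr : List Int) (val : Int) : Bool :=
  (PySem.List.pyRange (val + 1) (arr.length : Int) 1).any (fun i =>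
      PySem.List.pyGetD arr i 0 ≤ PySem.List.pyGetD arr val 0 + k &&
      PySem.List.pyGetD arr val 0 - k ≤ PySem.List.pyGetD arr i 0)
  || (PySem.List.pyRange 0 val 1).any (fun j =>
      PySem.List.pyGetD arr j 0 ≤ PySem.List.pyGetD arr val 0 + k &&
      PySem.List.pyGetD arr val 0 - k ≤ PySem.List.pyGetD arr j 0)

-- B's per-element condition: an adjacent neighbour in the sorted list is in range
def pBcond (k : Int) (s : List Int) (i : Int) : Bool :=
  (decide (0 < i) && decide (PySem.List.pyGetD s i 0 - PySem.List.pyGetD s (i - 1) 0 ≤ k))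
  || (decide (i + 1 < (s.length : Int)) && decide (PySem.List.pyGetD s (i + 1) 0 - PySem.List.pyGetD s i 0 ≤ k))

lemma countP_pyRange_zero (m : Nat) (p : Int → Bool) :
    (PySem.List.pyRange 0 (m : Int) 1).countP p = (List.range m).countP (fun (j : Nat) => p (j : Int)) := by
  rw [PySem.List.pyRange_one, List.countP_map]
  simp only [sub_zero, Int.toNat_natCast, zero_add, Function.comp_def]

lemma countP_range_getD (l : List Int) (q : Int → Bool) :
    (List.range l.length).countP (fun j => q (l.getD j 0)) = l.countP q := by
  have hmap : (List.range l.length).map (fun i => l.getD i 0) = l := by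
    apply List.ext_getElem
    · simp
    · intro i h1 h2; simp [List.getElem?_eq_getElem h2]
  conv_rhs => rw [← hmap]
  rw [List.countP_map]
  rfl

lemma getD_pyGetD (l : List Int) (m : Nat) (hm : m < l.length) :
    PySem.List.pyGetD l (m : Int) 0 = l[m]'hm := by
  rw [PySem.List.pyGetD_natCast, List.getD_eq_getElem?_getD, List.getElem?_eq_getElem hm]
  rfl

lemma if_if_or (a b : Bool) (h : Int) :
    (if a then h + 1 else if b then h + 1 else h) = (if (a || b) then h + 1 else h) := by
  cases a <;> simp

lemma pAcond_iff (k : Int) (arr : List Int) (j : Nat) (hj : j < arr.length) :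
    pAcond k arr (j : Int) = true ↔
      ∃ i, ∃ hi : i < arr.length, i ≠ j ∧ inI k (arr[j]'hj) (arr[i]'hi) = true := by
  unfold pAcond
  rw [Bool.or_eq_true, List.any_eq_true, List.any_eq_true]
  constructor
  · rintro (⟨i, hm, hp⟩ | ⟨i, hm, hp⟩) <;>
    · rw [PySem.List.mem_pyRange_one] at hm
      obtain ⟨m, rfl⟩ : ∃ m : Nat, i = (m : Int) := ⟨i.toNat, by omega⟩
      rw [getD_pyGetD arr m (by omega), getD_pyGetD arr j hj] at hp
      refine ⟨m, by omega, by omega, ?_⟩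
      simpa [inI] using hp
  · rintro ⟨i, hi, hne, hp⟩
    rcases Nat.lt_or_lt_of_ne hne with hlt | hlt
    · right
      refine ⟨(i : Int), PySem.List.mem_pyRange_one.mpr (by omega), ?_⟩
      rw [getD_pyGetD arr i (by omega), getD_pyGetD arr j hj]
      simpa [inI] using hp
    · left
      refine ⟨(i : Int), PySem.List.mem_pyRange_one.mpr (by omega), ?_⟩
      rw [getD_pyGetD arr i (by omega), getD_pyGetD arr j hj]
      simpa [inI] using hp

-- on a sorted list, the adjacent-neighbour test of B is the some-other-index test of A
lemma pBcond_iff (k : Int) (L : List Int)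
    (hmono : ∀ (p q : Nat) (hpq : p ≤ q) (hq : q < L.length),
      L[p]'(Nat.lt_of_le_of_lt hpq hq) ≤ L[q]'hq)
    (j : Nat) (hj : j < L.length) :
    pBcond k L (j : Int) = true ↔
      ∃ i, ∃ hi : i < L.length, i ≠ j ∧ inI k (L[j]'hj) (L[i]'hi) = true := by
  unfold pBcond
  rw [Bool.or_eq_true, Bool.and_eq_true, Bool.and_eq_true]
  simp only [decide_eq_true_iff]
  constructor
  · rintro (⟨h0, hle⟩ | ⟨h0, hle⟩)
    · rw [show ((j : Int) - 1) = ((j - 1 : Nat) : Int) from by omega,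
          getD_pyGetD L (j - 1) (by omega), getD_pyGetD L j hj] at hle
      have h01 := hmono (j - 1) j (by omega) hj
      refine ⟨j - 1, by omega, by omega, ?_⟩
      simp only [inI, Bool.and_eq_true, decide_eq_true_iff]
      omega
    · rw [show ((j : Int) + 1) = ((j + 1 : Nat) : Int) from by omega,
          getD_pyGetD L (j + 1) (by omega), getD_pyGetD L j hj] at hle
      have h01 := hmono j (j + 1) (by omega) (by omega)
      refine ⟨j + 1, by omega, by omega, ?_⟩
      simp only [inI, Bool.and_eq_true, decide_eq_true_iff]
      omega
  · rintro ⟨i, hi, hne, hp⟩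
    simp only [inI, Bool.and_eq_true, decide_eq_true_iff] at hp
    rcases Nat.lt_or_lt_of_ne hne with hlt | hlt
    · left
      have h1 := hmono i (j - 1) (by omega) (by omega)
      have h2 := hmono (j - 1) j (by omega) hj
      refine ⟨by omega, ?_⟩
      rw [getD_pyGetD L j hj, show ((j : Int) - 1) = ((j - 1 : Nat) : Int) from by omega,
          getD_pyGetD L (j - 1) (by omega)]
      omega
    · right
      have h1 := hmono (j + 1) i (by omega) hi
      have h2 := hmono j (j + 1) (by omega) (by omega)
      refine ⟨by omega, ?_⟩
      rw [show ((j : Int) + 1) = ((j + 1 : Nat) : Int) from by omega,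
          getD_pyGetD L (j + 1) (by omega), getD_pyGetD L j hj]
      omega

lemma pAcond_eq_happyP (k : Int) (arr : List Int) (j : Nat) (hj : j < arr.length) :
    pAcond k arr (j : Int) = happyP k arr (arr.getD j 0) := by
  have hg : arr.getD j 0 = arr[j]'hj := by
    rw [List.getD_eq_getElem?_getD, List.getElem?_eq_getElem hj]; rfl
  rw [hg]
  have h := (pAcond_iff k arr j hj).trans (exists_other_iff k (arr[j]'hj) arr j hj rfl)
  cases hA : pAcond k arr (j : Int) <;> cases hB : happyP k arr (arr[j]'hj) <;>
    simp [hA, hB] at h ⊢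

lemma pBcond_eq_happyP (k : Int) (L : List Int)
    (hmono : ∀ (p q : Nat) (hpq : p ≤ q) (hq : q < L.length),
      L[p]'(Nat.lt_of_le_of_lt hpq hq) ≤ L[q]'hq)
    (j : Nat) (hj : j < L.length) :
    pBcond k L (j : Int) = happyP k L (L.getD j 0) := by
  have hg : L.getD j 0 = L[j]'hj := by
    rw [List.getD_eq_getElem?_getD, List.getElem?_eq_getElem hj]; rfl
  rw [hg]
  have h := (pBcond_iff k L hmono j hj).trans (exists_other_iff k (L[j]'hj) L j hj rfl)
  cases hA : pBcond k L (j : Int) <;> cases hB : happyP k L (L[j]'hj) <;>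
    simp [hA, hB] at h ⊢

-- A counts exactly the elements having another occurrence within distance k
lemma happyVal_eq_countP (n k : Int) (arr : List Int) :
    happyVal n k arr = (arr.countP (happyP k arr) : Int) := by
  unfold happyVal
  rw [PySem.List.foldl_congr_mem (PySem.List.pyRange 0 (arr.length : Int) 1)
        _ (fun happy val => if pAcond k arr val then happy + 1 else happy) (0 : Int)
        (fun acc x _ => if_if_or _ _ acc),
      PySem.List.foldl_if_add_one, countP_pyRange_zero,
      List.countP_congr (fun j hjm => by
        rw [pAcond_eq_happyP k arr j (List.mem_range.mp hjm)]),
      countP_range_getD]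
  omega

-- B counts the same thing over the sorted copy
lemma happyVal_alt_eq_countP (n k : Int) (arr : List Int) :
    happyVal_alt n k arr = ((PySem.List.sorted arr (fun x => x) false).countP
      (happyP k (PySem.List.sorted arr (fun x => x) false)) : Int) := by
  have hmono : ∀ (p q : Nat) (hpq : p ≤ q)
      (hq : q < (PySem.List.sorted arr (fun x => x) false).length),
      (PySem.List.sorted arr (fun x => x) false)[p]'(Nat.lt_of_le_of_lt hpq hq) ≤
        (PySem.List.sorted arr (fun x => x) false)[q]'hq := by
    intro p q hpq hq
    exact PySem.List.sorted_id_getElem_mono arr hpq hq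
  unfold happyVal_alt
  show (PySem.List.pyRange 0 ((PySem.List.sorted arr (fun x => x) false).length : Int) 1).foldl
      (fun happy i => if pBcond k (PySem.List.sorted arr (fun x => x) false) i
        then happy + 1 else happy) 0 = _
  rw [PySem.List.foldl_if_add_one, countP_pyRange_zero,
      List.countP_congr (fun j hjm => by
        rw [pBcond_eq_happyP k _ hmono j (List.mem_range.mp hjm)]),
      countP_range_getD]
  omega

-- ===== VERDICT (by name: the statement is the Claim_ definition above) =====
theorem happyVal_spec : Claim_equal_happyVal := by
  intro n k arr _
  unfold Spec_happyVal
  rw [happyVal_eq_countP, happyVal_alt_eq_countP]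
  have hperm : arr.Perm (PySem.List.sorted arr (fun x => x) false) :=
    (PySem.List.sorted_perm arr (fun x => x) false).symm
  have hpt : ∀ x, happyP k arr x = happyP k (PySem.List.sorted arr (fun x => x) false) x := by
    intro x; unfold happyP; rw [hperm.countP_eq]
  rw [List.countP_congr (fun x _ => by rw [hpt x]), hperm.countP_eq]
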